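-- pv_equiv track=rewrite | github.com/tanya-ananya/CS-2 | lab2/ananya_taaruni_lab2.py | most_occuring
-- ===== SOURCE A (Python) =====
-- def most_occuring(nums):
--     nums_dict = {}
--     for x in nums:
--         if x not in nums_dict:
--             nums_dict[x] = 1
--         else:
--             nums_dict[x] += 1
--     most = 0
--     for value in nums_dict.values():
--         if value > most:
--             most = value
--
--     nums_list = []
--     for key, value in nums_dict.items():
--         if value == most:
--             nums_list.append(key)
--
--     return min(nums_list)
-- ===== SOURCE B (Python) =====
-- def most_occuring(nums):
--     # Sort once; scan the runs of equal values in sorted order, keeping the best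
--     # completed run; ties keep the earlier (= smaller) value automatically.
--     s = sorted(nums)
--     if not s:
--         raise ValueError("most_occuring() arg is an empty sequence")
--     best_v, best_c = s[0], 0
--     cur_v, cur_c = s[0], 0
--     for x in s:
--         if x == cur_v:
--             cur_c += 1
--         elif cur_c > best_c:
--             best_v, best_c, cur_v, cur_c = cur_v, cur_c, x, 1
--         else:
--             cur_v, cur_c = x, 1
--     return cur_v if cur_c > best_c else best_v
-- ===== Notes on version B (the rewrite author's own statement) =====
-- stated objective: alternative
-- what changed: B abandons the frequency dictionary entirely: it sorts the list once and scans the runs of equal values in sorted order, keeping the best completed run (strict improvement, so ties keep the earlier and hence smaller value), instead of A's hash counting followed by three passes (max count, filter, min).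
import Mathlib
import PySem

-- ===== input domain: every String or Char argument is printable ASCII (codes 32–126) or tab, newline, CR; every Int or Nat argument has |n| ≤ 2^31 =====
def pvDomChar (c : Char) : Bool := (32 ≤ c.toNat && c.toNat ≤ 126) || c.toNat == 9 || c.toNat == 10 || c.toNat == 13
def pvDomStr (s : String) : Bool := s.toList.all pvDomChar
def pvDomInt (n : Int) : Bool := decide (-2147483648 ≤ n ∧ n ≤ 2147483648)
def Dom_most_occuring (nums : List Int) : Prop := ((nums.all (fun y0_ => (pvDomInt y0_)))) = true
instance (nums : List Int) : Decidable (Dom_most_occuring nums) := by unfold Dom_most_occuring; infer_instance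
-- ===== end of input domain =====

-- B sorts the list once and finds the answer by recursive run-splitting over the sorted list
-- (no dictionary at all), instead of A's hash counting followed by three passes; return values
-- only (both raise ValueError on []).

-- ===== PORT A =====
def most_occuring (nums : List Int) : Int :=
  let nums_dict : PySem.Dict Int Int := nums.foldl
    (fun d x =>
      if PySem.Dict.contains d x = false then d.insert x 1
      else d.insert x (d.getD x 0 + 1))  -- nums_dict[x] += 1 (key present in this branch)
    PySem.Dict.empty
  let most := (PySem.Dict.values nums_dict).foldl (fun m v => if v > m then v else m) 0
  let nums_list := (PySem.Dict.items nums_dict).foldl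
    (fun acc kv => if kv.2 = most then acc ++ [kv.1] else acc) ([] : List Int)
  match PySem.List.min? nums_list (fun y => y) with
  | some m => m
  | none => 0  -- min([]) raises ValueError; Pre_ excludes nums = []

-- ===== PORT B =====
-- B-side helper: the body of B's run-scanning loop; state = (best_v, best_c, cur_v, cur_c)
def pvStep (st : Int × Int × Int × Int) (x : Int) : Int × Int × Int × Int :=
  if x = st.2.2.1 then (st.1, st.2.1, st.2.2.1, st.2.2.2 + 1)
  else if st.2.2.2 > st.2.1 then (st.2.2.1, st.2.2.2, x, 1)
  else (st.1, st.2.1, x, 1)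

def most_occuring_alt (nums : List Int) : Int :=
  match PySem.List.sorted nums (fun y => y) false with
  | [] => 0  -- raise ValueError; Pre_ excludes nums = []
  | v :: t =>
    let st := (v :: t).foldl pvStep (v, 0, v, 0)
    if st.2.2.2 > st.2.1 then st.2.2.1 else st.1

-- ===== PRECONDITION & SPEC =====
-- Pre_ excludes only the empty list, on which A raises ValueError (min of an empty sequence);
-- B also raises ValueError there.
def Pre_most_occuring (nums : List Int) : Prop := nums ≠ []
instance (nums : List Int) : Decidable (Pre_most_occuring nums) := by unfold Pre_most_occuring; infer_instance
def pvWitness_most_occuring : List Int := ([1] : List Int)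

def Spec_most_occuring (nums : List Int) (out : Int) : Prop := out = most_occuring_alt nums
instance (nums : List Int) (out : Int) : Decidable (Spec_most_occuring nums out) := by unfold Spec_most_occuring; infer_instance

-- ===== CLAIM (what is proved, stated in full; the proofs are below) =====
def Claim_equal_most_occuring : Prop := ∀ (nums : List Int), Dom_most_occuring nums → Pre_most_occuring nums → Spec_most_occuring nums (most_occuring nums)

-- ===== LEMMAS AND PROOFS =====

-- the common characterisation: m is the smallest element of l among those of maximal multiplicity
def pvIsWinner (l : List Int) (m : Int) : Prop :=
  m ∈ l ∧ (∀ y ∈ l, l.count y ≤ l.count m) ∧ (∀ y ∈ l, l.count y = l.count m → m ≤ y)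

lemma pvIsWinner_unique {l : List Int} {m₁ m₂ : Int}
    (h₁ : pvIsWinner l m₁) (h₂ : pvIsWinner l m₂) : m₁ = m₂ := by
  obtain ⟨hm₁, hmax₁, hmin₁⟩ := h₁
  obtain ⟨hm₂, hmax₂, hmin₂⟩ := h₂
  have hc : l.count m₁ = l.count m₂ :=
    le_antisymm (hmax₂ m₁ hm₁) (hmax₁ m₂ hm₂)
  have h12 : m₁ ≤ m₂ := hmin₁ m₂ hm₂ hc.symm
  have h21 : m₂ ≤ m₁ := hmin₂ m₁ hm₁ hc
  omega

lemma pvIsWinner_perm {l l' : List Int} {m : Int} (hp : l.Perm l')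
    (h : pvIsWinner l m) : pvIsWinner l' m := by
  obtain ⟨hm, hmax, hmin⟩ := h
  refine ⟨hp.mem_iff.mp hm, ?_, ?_⟩
  · intro y hy
    rw [← hp.count_eq, ← hp.count_eq]
    exact hmax y (hp.mem_iff.mpr hy)
  · intro y hy hc
    rw [← hp.count_eq, ← hp.count_eq] at hc
    exact hmin y (hp.mem_iff.mpr hy) hc

-- ---------- A side ----------

lemma getD_zero_of_not_contains (d : PySem.Dict Int Int) (x : Int)
    (h : PySem.Dict.contains d x = false) : d.getD x 0 = 0 := by
  simp only [PySem.Dict.getD, PySem.Dict.get?, PySem.Dict.contains] at *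
  rw [List.find?_eq_none.2]
  · rfl
  · intro p hp
    simpa using List.any_eq_false.mp h p hp

-- A's count loop (membership test, then 1 or +1) builds Counter(nums)
lemma countA_eq_counter (nums : List Int) :
    nums.foldl (fun (d : PySem.Dict Int Int) x =>
      if PySem.Dict.contains d x = false then d.insert x 1
      else d.insert x (d.getD x 0 + 1)) PySem.Dict.empty
    = PySem.Dict.counter nums := by
  rw [← PySem.Dict.foldl_insert_getD_add_one_eq_counter]
  congr 1
  funext d x
  by_cases h : PySem.Dict.contains d x = false
  · simp [h, getD_zero_of_not_contains d x h]
  · simp [h]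

-- A's running-max loop is foldl max
lemma foldl_if_gt_eq_foldl_max (l : List Int) (a : Int) :
    l.foldl (fun m v => if v > m then v else m) a = l.foldl max a := by
  congr 1
  funext m v
  rcases lt_trichotomy m v with h | h | h <;> simp [max_def] <;> omega

-- A's result is the winner
lemma A_winner (nums : List Int) (hne : nums ≠ []) : pvIsWinner nums (most_occuring nums) := by
  unfold most_occuring
  simp only
  rw [countA_eq_counter]
  set D := PySem.Dict.counter nums with hD
  have hitems : D.items = (PySem.Set.ofList nums).map (fun k => (k, (nums.count k : Int))) :=
    PySem.Dict.items_counter nums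
  have hvals : PySem.Dict.values D = D.items.map Prod.snd := rfl
  rw [foldl_if_gt_eq_foldl_max, hvals]
  set most := (D.items.map Prod.snd).foldl max 0 with hmost
  -- every count is ≤ most
  have hub : ∀ y ∈ nums, ((nums.count y : Int)) ≤ most := by
    intro y hy
    have hyk : y ∈ PySem.Set.ofList nums := (PySem.Set.mem_ofList nums y).mpr hy
    have : ((nums.count y : Int)) ∈ D.items.map Prod.snd := by
      rw [hitems, List.map_map]
      exact List.mem_map_of_mem hyk
    exact (PySem.List.le_foldl_max _ 0).2 _ this
  -- most is attained
  have hpos : ∀ q ∈ D.items, (1 : Int) ≤ q.2 := by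
    intro q hq
    rw [hitems] at hq
    obtain ⟨k, hk, rfl⟩ := List.mem_map.mp hq
    have hkm : k ∈ nums := (PySem.Set.mem_ofList nums k).mp hk
    have := List.count_pos_iff.mpr hkm
    simp only
    exact_mod_cast this
  have hneI : D.items ≠ [] := by
    obtain ⟨a, t, rfl⟩ := List.exists_cons_of_ne_nil hne
    rw [hitems]
    have : a ∈ PySem.Set.ofList (a :: t) := (PySem.Set.mem_ofList _ a).mpr List.mem_cons_self
    exact List.ne_nil_of_mem (List.mem_map_of_mem this)
  have hmost_mem : ∃ k ∈ nums, ((nums.count k : Int)) = most := by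
    rcases PySem.List.foldl_max_mem (D.items.map Prod.snd) 0 with h | h
    · obtain ⟨a, t, he⟩ := List.exists_cons_of_ne_nil hneI
      have h1 : (1 : Int) ≤ a.2 := hpos a (he ▸ List.mem_cons_self)
      have h2 : a.2 ≤ most := (PySem.List.le_foldl_max _ 0).2 _ (List.mem_map_of_mem (he ▸ List.mem_cons_self))
      omega
    · obtain ⟨q, hq, hq2⟩ := List.mem_map.mp h
      rw [hitems] at hq
      obtain ⟨k, hk, rfl⟩ := List.mem_map.mp hq
      exact ⟨k, (PySem.Set.mem_ofList nums k).mp hk, hq2⟩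
  -- A's filter loop
  rw [show (fun (acc : List Int) (kv : Int × Int) => if kv.2 = most then acc ++ [kv.1] else acc)
        = (fun acc kv => if (fun (kv : Int × Int) => decide (kv.2 = most)) kv = true then acc ++ [kv.1] else acc)
      from by funext acc kv; simp,
     PySem.List.foldl_append_if]
  simp only [List.nil_append]
  set numsl := (D.items.filter (fun kv => decide (kv.2 = most))).map (fun kv => kv.1) with hnl
  -- membership in numsl ↔ in nums with count = most
  have hmem_nl : ∀ k, k ∈ numsl ↔ k ∈ nums ∧ ((nums.count k : Int)) = most := by
    intro k
    rw [hnl, hitems]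
    constructor
    · intro hk
      obtain ⟨q, hq, hq1⟩ := List.mem_map.mp hk
      obtain ⟨hqm, hqc⟩ := List.mem_filter.mp hq
      obtain ⟨k', hk', rfl⟩ := List.mem_map.mp hqm
      simp only at hq1
      subst hq1
      exact ⟨(PySem.Set.mem_ofList nums _).mp hk', by simpa using hqc⟩
    · rintro ⟨hk, hc⟩
      refine List.mem_map.mpr ⟨(k, (nums.count k : Int)), List.mem_filter.mpr ⟨?_, by simpa using hc⟩, rfl⟩
      exact List.mem_map_of_mem ((PySem.Set.mem_ofList nums k).mpr hk)
  -- conclude via min?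
  cases hmin : PySem.List.min? numsl (fun y => y) with
  | none =>
    obtain ⟨k, hk, hc⟩ := hmost_mem
    have : k ∈ numsl := (hmem_nl k).mpr ⟨hk, hc⟩
    exact absurd ((PySem.List.min?_eq_none_iff _ _).mp hmin) (List.ne_nil_of_mem this)
  | some m =>
    show pvIsWinner nums m
    obtain ⟨hmn, hmc⟩ := (hmem_nl m).mp (PySem.List.min?_mem hmin)
    refine ⟨hmn, ?_, ?_⟩
    · intro y hy
      have h1 := hub y hy
      rw [← hmc] at h1
      exact_mod_cast h1
    · intro y hy hc
      have hyc : ((nums.count y : Int)) = most := by rw [← hmc]; exact_mod_cast hc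
      exact PySem.List.min?_isMin hmin y ((hmem_nl y).mpr ⟨hy, hyc⟩)

-- ---------- B side ----------

-- loop invariant of B's run scan after processing the prefix p of the sorted list:
-- (cv, cc) is the current run (cc = multiplicity of the last value cv), and (bv, bc) is the
-- best completed run so far (none yet when bc = 0), ties resolved to the smaller value
def pvInv (p : List Int) (bv bc cv cc : Int) : Prop :=
  cv ∈ p ∧ (∀ y ∈ p, y ≤ cv) ∧ cc = (p.count cv : Int) ∧
  ((bc = 0 ∧ ∀ y ∈ p, y = cv) ∨
   (1 ≤ bc ∧ bv ∈ p ∧ bv < cv ∧ bc = (p.count bv : Int) ∧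
    (∀ y ∈ p, y ≠ cv → (p.count y : Int) ≤ bc) ∧
    (∀ y ∈ p, y ≠ cv → (p.count y : Int) = bc → bv ≤ y)))

lemma pvInv_fold : ∀ (rest p : List Int) (bv bc cv cc : Int),
    pvInv p bv bc cv cc →
    (∀ y ∈ p, ∀ z ∈ rest, y ≤ z) →
    rest.Pairwise (· ≤ ·) →
    ∃ bv' bc' cv' cc', rest.foldl pvStep (bv, bc, cv, cc) = (bv', bc', cv', cc') ∧
      pvInv (p ++ rest) bv' bc' cv' cc' := by
  intro rest
  induction rest with
  | nil =>
    intro p bv bc cv cc hinv _ _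
    exact ⟨bv, bc, cv, cc, rfl, by simpa using hinv⟩
  | cons x rest ih =>
    intro p bv bc cv cc hinv hcross hpw
    obtain ⟨hcvm, hle, hcc, hdisj⟩ := hinv
    have hcx : ∀ y ∈ p, y ≤ x := fun y hy => hcross y hy x List.mem_cons_self
    have hxr : ∀ z ∈ rest, x ≤ z := (List.pairwise_cons.mp hpw).1
    have hpw' : rest.Pairwise (· ≤ ·) := (List.pairwise_cons.mp hpw).2
    have hcnt : ∀ y : Int, (p ++ [x]).count y = p.count y + (if y = x then 1 else 0) := by
      intro y
      by_cases h : y = x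
      · simp [List.count_append, List.count_cons, h]
      · simp [List.count_append, List.count_cons, h]
        omega
    have hcross' : ∀ y ∈ p ++ [x], ∀ z ∈ rest, y ≤ z := by
      intro y hy z hz
      rcases List.mem_append.mp hy with h | h
      · exact hcross y h z (List.mem_cons_of_mem _ hz)
      · simp only [List.mem_singleton] at h
        subst h
        exact hxr z hz
    have happ : (p ++ [x]) ++ rest = p ++ (x :: rest) := by simp
    have hmain : ∃ bv' bc' cv' cc', pvStep (bv, bc, cv, cc) x = (bv', bc', cv', cc') ∧
        pvInv (p ++ [x]) bv' bc' cv' cc' := by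
      by_cases hxc : x = cv
      · -- the run continues
        refine ⟨bv, bc, cv, cc + 1, by simp [pvStep, hxc], ?_, ?_, ?_, ?_⟩
        · exact List.mem_append_left _ hcvm
        · intro y hy
          rcases List.mem_append.mp hy with h | h
          · exact hle y h
          · simp only [List.mem_singleton] at h
            omega
        · rw [hcnt cv, if_pos hxc.symm]
          push_cast
          omega
        · rcases hdisj with ⟨hbc, hall⟩ | ⟨hbc, hbvm, hbvlt, hbcc, hmax, hmin⟩
          · refine Or.inl ⟨hbc, ?_⟩
            intro y hy
            rcases List.mem_append.mp hy with h | h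
            · exact hall y h
            · simp only [List.mem_singleton] at h
              omega
          · refine Or.inr ⟨hbc, List.mem_append_left _ hbvm, hbvlt, ?_, ?_, ?_⟩
            · rw [hcnt bv, if_neg (by omega)]
              push_cast
              omega
            · intro y hy hyne
              have hyp : y ∈ p := by
                rcases List.mem_append.mp hy with h | h
                · exact h
                · simp only [List.mem_singleton] at h
                  omega
              rw [hcnt y, if_neg (by omega)]
              push_cast
              have := hmax y hyp hyne
              omega
            · intro y hy hyne hyc
              have hyp : y ∈ p := by
                rcases List.mem_append.mp hy with h | h
                · exact h
                · simp only [List.mem_singleton] at h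
                  omega
              rw [hcnt y, if_neg (by omega)] at hyc
              push_cast at hyc
              exact hmin y hyp hyne (by omega)
      · -- a new run starts at x, with cv < x and x fresh
        have hcvx : cv < x := lt_of_le_of_ne (hcx cv hcvm) (Ne.symm hxc)
        have hfresh : x ∉ p := fun hx => absurd (hle x hx) (by omega)
        have hcpx : p.count x = 0 := List.count_eq_zero.mpr hfresh
        have hccpos : (1 : Int) ≤ cc := by
          have := List.count_pos_iff.mpr hcvm
          omega
        have hxcnt : ((p ++ [x]).count x : Int) = 1 := by
          rw [hcnt x]
          simp [hcpx]
        have hmem' : ∀ y ∈ p ++ [x], y ≠ x → y ∈ p := by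
          intro y hy hyne
          rcases List.mem_append.mp hy with h | h
          · exact h
          · simp only [List.mem_singleton] at h
            omega
        have hold : ∀ y ∈ p, ((p ++ [x]).count y : Int) = (p.count y : Int) := by
          intro y hy
          rw [hcnt y, if_neg (by rintro rfl; exact hfresh hy)]
          push_cast
          omega
        by_cases hgt : cc > bc
        · -- the current run becomes the best completed run
          refine ⟨cv, cc, x, 1, by simp [pvStep, hxc, hgt], ?_, ?_, hxcnt.symm, Or.inr ⟨by omega,
            List.mem_append_left _ hcvm, hcvx, by rw [hold cv hcvm]; omega, ?_, ?_⟩⟩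
          · exact List.mem_append_right _ List.mem_cons_self
          · intro y hy
            rcases List.mem_append.mp hy with h | h
            · have := hcx y h
              omega
            · simp only [List.mem_singleton] at h
              omega
          · intro y hy hyne
            have hyp := hmem' y hy hyne
            rw [hold y hyp]
            by_cases hycv : y = cv
            · subst hycv
              omega
            · rcases hdisj with ⟨hbc, hall⟩ | ⟨hbc, hbvm, hbvlt, hbcc, hmax, hmin⟩
              · exact absurd (hall y hyp) hycv
              · have := hmax y hyp hycv
                omega
          · intro y hy hyne hyc
            have hyp := hmem' y hy hyne
            rw [hold y hyp] at hyc
            by_cases hycv : y = cv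
            · omega
            · rcases hdisj with ⟨hbc, hall⟩ | ⟨hbc, hbvm, hbvlt, hbcc, hmax, hmin⟩
              · exact absurd (hall y hyp) hycv
              · have := hmax y hyp hycv
                omega
        · -- the completed run loses; keep (bv, bc)
          rcases hdisj with ⟨hbc, hall⟩ | ⟨hbc, hbvm, hbvlt, hbcc, hmax, hmin⟩
          · omega
          refine ⟨bv, bc, x, 1, by simp [pvStep, hxc, hgt], ?_, ?_, hxcnt.symm, Or.inr ⟨hbc,
            List.mem_append_left _ hbvm, by omega, by rw [hold bv hbvm]; omega, ?_, ?_⟩⟩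
          · exact List.mem_append_right _ List.mem_cons_self
          · intro y hy
            rcases List.mem_append.mp hy with h | h
            · have := hcx y h
              omega
            · simp only [List.mem_singleton] at h
              omega
          · intro y hy hyne
            have hyp := hmem' y hy hyne
            rw [hold y hyp]
            by_cases hycv : y = cv
            · subst hycv
              omega
            · have := hmax y hyp hycv
              omega
          · intro y hy hyne hyc
            have hyp := hmem' y hy hyne
            rw [hold y hyp] at hyc
            by_cases hycv : y = cv
            · subst hycv
              have : bc = cc := by omega
              omega
            · exact hmin y hyp hycv (by omega)
    obtain ⟨bv1, bc1, cv1, cc1, hstep, hinv1⟩ := hmain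
    obtain ⟨bv', bc', cv', cc', hfold, hinv'⟩ := ih (p ++ [x]) bv1 bc1 cv1 cc1 hinv1 hcross' hpw'
    refine ⟨bv', bc', cv', cc', ?_, by rwa [happ] at hinv'⟩
    rw [List.foldl_cons, hstep, hfold]

-- at the end of the scan the flushed answer is the winner
lemma pvInv_winner (s : List Int) (bv bc cv cc : Int) (h : pvInv s bv bc cv cc) :
    pvIsWinner s (if cc > bc then cv else bv) := by
  obtain ⟨hcvm, hle, hcc, hdisj⟩ := h
  have hccpos : (1 : Int) ≤ cc := by
    have := List.count_pos_iff.mpr hcvm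
    omega
  by_cases hgt : cc > bc
  · rw [if_pos hgt]
    refine ⟨hcvm, ?_, ?_⟩
    · intro y hy
      by_cases hycv : y = cv
      · subst hycv
        omega
      · rcases hdisj with ⟨hbc, hall⟩ | ⟨hbc, hbvm, hbvlt, hbcc, hmax, hmin⟩
        · exact absurd (hall y hy) hycv
        · have h1 := hmax y hy hycv
          have : ((s.count y : Int)) ≤ ((s.count cv : Int)) := by omega
          exact_mod_cast this
    · intro y hy hyc
      by_cases hycv : y = cv
      · omega
      · rcases hdisj with ⟨hbc, hall⟩ | ⟨hbc, hbvm, hbvlt, hbcc, hmax, hmin⟩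
        · exact absurd (hall y hy) hycv
        · have h1 := hmax y hy hycv
          have h2 : ((s.count y : Int)) = ((s.count cv : Int)) := by exact_mod_cast hyc
          omega
  · rw [if_neg hgt]
    rcases hdisj with ⟨hbc, hall⟩ | ⟨hbc, hbvm, hbvlt, hbcc, hmax, hmin⟩
    · omega
    refine ⟨hbvm, ?_, ?_⟩
    · intro y hy
      by_cases hycv : y = cv
      · rw [hycv]
        have : ((s.count cv : Int)) ≤ ((s.count bv : Int)) := by omega
        exact_mod_cast this
      · have h1 := hmax y hy hycv
        have : ((s.count y : Int)) ≤ ((s.count bv : Int)) := by omega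
        exact_mod_cast this
    · intro y hy hyc
      by_cases hycv : y = cv
      · omega
      · refine hmin y hy hycv ?_
        have h2 : ((s.count y : Int)) = ((s.count bv : Int)) := by exact_mod_cast hyc
        omega

-- B's result is the winner
lemma B_winner (nums : List Int) (hne : nums ≠ []) : pvIsWinner nums (most_occuring_alt nums) := by
  unfold most_occuring_alt
  have hperm : (PySem.List.sorted nums (fun y => y) false).Perm nums :=
    PySem.List.sorted_perm nums (fun y => y) false
  cases hs : PySem.List.sorted nums (fun y => y) false with
  | nil =>
    exact absurd ((PySem.List.sorted_eq_nil_iff nums (fun y => y) false).mp hs) hne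
  | cons v t =>
    have hpw : (v :: t).Pairwise (· ≤ ·) := by
      have h := PySem.List.sorted_pairwise nums (fun y => y) (κ := Int)
      rw [hs] at h
      exact h
    have hstep0 : (v :: t).foldl pvStep (v, 0, v, 0) = t.foldl pvStep (v, 0, v, 1) := by
      simp [pvStep]
    have hinv1 : pvInv [v] v 0 v 1 := by
      refine ⟨List.mem_singleton.mpr rfl, ?_, by simp, Or.inl ⟨rfl, ?_⟩⟩
      · intro y hy
        simp only [List.mem_singleton] at hy
        omega
      · intro y hy
        simpa using hy
    have hcross : ∀ y ∈ [v], ∀ z ∈ t, y ≤ z := by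
      intro y hy z hz
      simp only [List.mem_singleton] at hy
      subst hy
      exact (List.pairwise_cons.mp hpw).1 z hz
    obtain ⟨bv, bc, cv, cc, hfold, hinv⟩ :=
      pvInv_fold t [v] v 0 v 1 hinv1 hcross (List.pairwise_cons.mp hpw).2
    have hw : pvIsWinner (v :: t) (if cc > bc then cv else bv) := by
      have := pvInv_winner ([v] ++ t) bv bc cv cc hinv
      simpa using this
    simp only [hstep0, hfold]
    exact pvIsWinner_perm (hs ▸ hperm) hw

-- ===== VERDICT (by name: the statement is the Claim_ definition above) =====
theorem most_occuring_spec : Claim_equal_most_occuring := by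
  intro nums _ hpre
  unfold Spec_most_occuring
  exact pvIsWinner_unique (A_winner nums hpre) (B_winner nums hpre)
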